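-- pv_equiv track=rewrite | github.com/JavonDavis/Competive-Programming-Python | hackerrank/algorithms/greedy/easy/priyanka_and_toys/solution.py | pointsCoveredSorted
-- ===== SOURCE A (Python) =====
-- def pointsCoveredSorted(points):
--     segments, i = [], 0
--     n = len(points)
--     while i < n:
--         segment = [points[i], points[i] + 4]
--         segments.append(segment)
--         i += 1
--         while i < n and points[i] <= segment[1]:
--             i += 1
--     return segments
-- ===== SOURCE B (Python) =====
-- def pointsCoveredSorted(points):
--     if not points:
--         return []
--     # stage 1: record the running right-edge as it stands BEFORE each point
--     bounds = []
--     edge = points[0] - 1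
--     for p in points:
--         bounds.append(edge)
--         if p > edge:
--             edge = p + 4
--     # stage 2: a point starts a segment exactly when it lies beyond the edge before it
--     return [[p, p + 4] for p, e in zip(points, bounds) if p > e]
-- ===== Notes on version B (the rewrite author's own statement) =====
-- stated objective: alternative
-- what changed: Replaced A's fused nested while-loops (index cursor with an inner skip loop) by two staged passes: a scan that materialises the running right-edge before each point, then a declarative zip/filter/map comprehension selecting the points beyond their edge.
import Mathlib
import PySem

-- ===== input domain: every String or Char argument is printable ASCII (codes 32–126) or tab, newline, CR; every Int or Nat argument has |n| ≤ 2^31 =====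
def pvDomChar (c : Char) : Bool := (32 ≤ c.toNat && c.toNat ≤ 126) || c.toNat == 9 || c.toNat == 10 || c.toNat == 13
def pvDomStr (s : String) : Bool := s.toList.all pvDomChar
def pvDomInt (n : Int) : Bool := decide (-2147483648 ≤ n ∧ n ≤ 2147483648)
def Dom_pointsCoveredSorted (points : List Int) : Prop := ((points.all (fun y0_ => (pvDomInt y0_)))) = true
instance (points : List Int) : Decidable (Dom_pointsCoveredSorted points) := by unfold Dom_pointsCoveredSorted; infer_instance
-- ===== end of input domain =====

-- B replaces A's fused nested while-loops by two staged passes (a bounds scan, then a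
-- zip/filter/map comprehension); objective: alternative (same cost, different shape).

-- ===== PORT A =====
-- A's inner `while i < n and points[i] <= segment[1]: i += 1` skip loop
def pcsSkip (b : Int) : List Int → List Int
  | [] => []
  | q :: r => if q ≤ b then pcsSkip b r else q :: r

theorem pcsSkip_length_le (b : Int) (l : List Int) : (pcsSkip b l).length ≤ l.length := by
  induction l with
  | nil => simp [pcsSkip]
  | cons q r ih =>
    simp only [pcsSkip]; split
    · simp only [List.length_cons]; omega
    · simp

-- A's outer while loop: take the current point, emit [p, p+4], then skip covered points
def pointsCoveredSorted (points : List Int) : List (List Int) :=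
  match points with
  | [] => []
  | p :: rest => [p, p + 4] :: pointsCoveredSorted (pcsSkip (p + 4) rest)
termination_by points.length
decreasing_by
  have := pcsSkip_length_le (p + 4) rest
  simp; omega

-- ===== PORT B =====
-- B's stage-1 loop body: append the edge as it stands before p, then update it
def pcsBoundsStep (st : List Int × Int) (p : Int) : List Int × Int :=
  (st.1 ++ [st.2], if p > st.2 then p + 4 else st.2)

def pointsCoveredSorted_alt (points : List Int) : List (List Int) :=
  match points with
  | [] => []
  | p0 :: _ =>
    let bounds := (points.foldl pcsBoundsStep ([], p0 - 1)).1
    ((points.zip bounds).filter (fun pe => pe.2 < pe.1)).map (fun pe => [pe.1, pe.1 + 4])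

-- ===== PRECONDITION & SPEC =====
def Spec_pointsCoveredSorted (points : List Int) (out : List (List Int)) : Prop := out = pointsCoveredSorted_alt points
instance (points : List Int) (out : List (List Int)) : Decidable (Spec_pointsCoveredSorted points out) := by unfold Spec_pointsCoveredSorted; infer_instance

-- ===== CLAIM (what is proved, stated in full; the proofs are below) =====
def Claim_equal_pointsCoveredSorted : Prop := ∀ (points : List Int), Dom_pointsCoveredSorted points → Spec_pointsCoveredSorted points (pointsCoveredSorted points)

-- ===== LEMMAS AND PROOFS =====

-- recursive form of stage 1's bounds list
def pcsBL : List Int → Int → List Int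
  | [], _ => []
  | p :: r, e => e :: pcsBL r (if p > e then p + 4 else e)

theorem pcs_fold_bounds (l : List Int) :
    ∀ (acc : List Int) (e : Int),
      (l.foldl pcsBoundsStep (acc, e)).1 = acc ++ pcsBL l e := by
  induction l with
  | nil => intro acc e; simp [pcsBL]
  | cons p r ih =>
    intro acc e
    simp only [List.foldl_cons, pcsBoundsStep, pcsBL, ih]
    simp

-- B's stage 2 over (l, bounds-before-each-point from edge e) equals A run on the
-- suffix of l left after skipping the points covered by edge e
theorem pcs_seg_eq (l : List Int) :
    ∀ (e : Int),
      ((l.zip (pcsBL l e)).filter (fun pe => pe.2 < pe.1)).map (fun pe => [pe.1, pe.1 + 4])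
        = pointsCoveredSorted (pcsSkip e l) := by
  induction l with
  | nil => intro e; simp [pcsBL, pcsSkip, pointsCoveredSorted]
  | cons p r ih =>
    intro e
    by_cases h : e < p
    · have h' : ¬ p ≤ e := by omega
      simp only [pcsBL, if_pos h, List.zip_cons_cons, List.filter_cons, pcsSkip, if_neg h']
      simp only [decide_eq_true_eq, if_pos h, List.map_cons, ih]
      rw [pointsCoveredSorted]
    · have h' : p ≤ e := by omega
      have hif : ¬ p > e := by omega
      simp only [pcsBL, if_neg hif, List.zip_cons_cons, List.filter_cons, pcsSkip, if_pos h']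
      simp only [decide_eq_true_eq, if_neg h, ih]

-- ===== VERDICT (by name: the statement is the Claim_ definition above) =====
theorem pointsCoveredSorted_spec : Claim_equal_pointsCoveredSorted := by
  intro points _
  show pointsCoveredSorted points = pointsCoveredSorted_alt points
  cases points with
  | nil => simp [pointsCoveredSorted, pointsCoveredSorted_alt]
  | cons p r =>
    have hskip : pcsSkip (p - 1) (p :: r) = p :: r := by
      have : ¬ p ≤ p - 1 := by omega
      simp [pcsSkip, this]
    simp only [pointsCoveredSorted_alt, pcs_fold_bounds, List.nil_append]
    rw [pcs_seg_eq (p :: r) (p - 1), hskip]
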